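-- pv_equiv track=rewrite | github.com/decoct-io/decoct | src/decoct/compression/archetypal.py | _find_identity_fields
-- ===== SOURCE A (Python) =====
-- from typing import Any
--
-- def _find_identity_fields(flat: dict[str, dict[str, Any]], hosts: list[str]) -> set[str]:
--     """Fields present in all hosts with all-unique values."""
--     if len(hosts) < 2:
--         return set()
--     path_sets = [set(flat[h].keys()) for h in hosts]
--     shared = path_sets[0].copy()
--     for ps in path_sets[1:]:
--         shared &= ps
--
--     identity: set[str] = set()
--     for path in shared:
--         sigs: set[tuple[str, str]] = set()
--         all_unique = True
--         for h in hosts: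
--             sig = (type(flat[h][path]).__name__, repr(flat[h][path]))
--             if sig in sigs:
--                 all_unique = False
--                 break
--             sigs.add(sig)
--         if all_unique:
--             identity.add(path)
--     return identity
-- ===== SOURCE B (Python) =====
-- from typing import Any
--
-- def _find_identity_fields(flat: dict[str, dict[str, Any]], hosts: list[str]) -> set[str]:
--     """Fields present in all hosts with all-unique values."""
--     if len(hosts) < 2:
--         return set()
--     n = len(hosts)
--     # One pass over every (path, value) of every host: path -> (host count, signature set).
--     acc: dict[str, tuple[int, set]] = {}
--     for h in hosts:
--         for path, value in flat[h].items():
--             sig = (type(value).__name__, repr(value))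
--             c, sigs = acc.get(path, (0, set()))
--             sigs.add(sig)
--             acc[path] = (c + 1, sigs)
--     # A field is an identity field iff it occurs in all n hosts with n distinct signatures.
--     return {p for p, (c, sigs) in acc.items() if c == n and len(sigs) == n}
-- ===== Notes on version B (the rewrite author's own statement) =====
-- stated objective: alternative
-- what changed: Replaces A's key-set intersection followed by a per-path nested early-exit uniqueness scan with a single accumulation pass building one dict path -> (host count, signature set), then a filter keeping paths whose count and signature-set size both equal len(hosts).
import Mathlib
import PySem

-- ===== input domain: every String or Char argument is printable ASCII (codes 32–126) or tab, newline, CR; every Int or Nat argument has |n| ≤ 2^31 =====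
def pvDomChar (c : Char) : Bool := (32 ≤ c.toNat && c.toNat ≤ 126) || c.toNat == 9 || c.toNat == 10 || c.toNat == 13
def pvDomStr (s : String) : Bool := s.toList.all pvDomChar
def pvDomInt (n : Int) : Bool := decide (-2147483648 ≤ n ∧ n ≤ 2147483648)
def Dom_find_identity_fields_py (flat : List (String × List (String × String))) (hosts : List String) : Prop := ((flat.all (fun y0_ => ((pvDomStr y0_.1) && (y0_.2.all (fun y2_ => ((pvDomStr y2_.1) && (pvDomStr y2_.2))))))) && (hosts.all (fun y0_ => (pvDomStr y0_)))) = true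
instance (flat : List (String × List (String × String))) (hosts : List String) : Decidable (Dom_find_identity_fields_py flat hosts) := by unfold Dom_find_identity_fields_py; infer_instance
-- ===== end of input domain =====

-- B replaces A's key-set intersection + per-path nested early-exit uniqueness scan by one
-- accumulation pass (path -> host count, signature set) followed by a filter (alternative decomposition).


-- ===== PORT A =====
-- 'sig = (type(flat[h][path]).__name__, repr(flat[h][path]))': all values are str here, so the
-- type name is always "str" and repr is injective on str; the sig pair is ported as ("str", value)
-- (exact for every equality test the sigs are used in; sigs never appear in the output).
def find_identity_fields_py (flat : List (String × List (String × String))) (hosts : List String) : List String :=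
  if hosts.length < 2 then PySem.Set.empty
  else
    let path_sets : List (PySem.Set String) :=
      hosts.map (fun h => PySem.Set.ofList (PySem.Dict.keys ⟨PySem.Dict.getD ⟨flat⟩ h []⟩))
    let shared : PySem.Set String :=
      (path_sets.drop 1).foldl (fun s ps => PySem.Set.inter s ps) (path_sets.headD PySem.Set.empty)
    shared.foldl (fun identity path =>
      let r := hosts.foldl
        (fun (st : PySem.Set (String × String) × Bool) h =>
          if st.2 then
            let sig : String × String := ("str", PySem.Dict.getD ⟨PySem.Dict.getD ⟨flat⟩ h []⟩ path "")
            if PySem.Set.contains st.1 sig then (st.1, false)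
            else (PySem.Set.add st.1 sig, true)
          else st)
        (PySem.Set.empty, true)
      if r.2 then PySem.Set.add identity path else identity) PySem.Set.empty

-- ===== PORT B =====
-- same sig convention as port A: ("str", value)
def find_identity_fields_py_alt (flat : List (String × List (String × String))) (hosts : List String) : List String :=
  if hosts.length < 2 then PySem.Set.empty
  else
    let n : Int := hosts.length
    let acc : PySem.Dict String (Int × PySem.Set (String × String)) :=
      hosts.foldl (fun d h =>
        (PySem.Dict.getD (⟨flat⟩ : PySem.Dict String (List (String × String))) h []).foldl
          (fun d2 pv =>
            let sig : String × String := ("str", pv.2)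
            let cs := PySem.Dict.getD d2 pv.1 (0, PySem.Set.empty)
            PySem.Dict.insert d2 pv.1 (cs.1 + 1, PySem.Set.add cs.2 sig)) d)
        PySem.Dict.empty
    acc.items.foldl (fun out e =>
      if e.2.1 == n && PySem.Set.len e.2.2 == n then PySem.Set.add out e.1 else out) PySem.Set.empty

-- ===== PRECONDITION & SPEC =====
-- Pre_ excludes (a) inputs where some listed host is missing from flat, on which the Python A
-- raises KeyError (B raises there too), and (b) association lists with duplicate keys inside one
-- host's field dict, which represent no Python dict value (a Python dict has unique keys).
def Pre_find_identity_fields_py (flat : List (String × List (String × String))) (hosts : List String) : Prop :=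
  (hosts.length < 2 ∨ ∀ h ∈ hosts, h ∈ flat.map Prod.fst) ∧
  ∀ e ∈ flat, (e.2.map Prod.fst).Nodup
instance (flat : List (String × List (String × String))) (hosts : List String) : Decidable (Pre_find_identity_fields_py flat hosts) := by unfold Pre_find_identity_fields_py; infer_instance

def pvWitness_find_identity_fields_py : (List (String × List (String × String))) × List String :=
  ([("a", [("x", "1"), ("y", "7")]), ("b", [("x", "2"), ("y", "7")])], ["a", "b"])

def Spec_find_identity_fields_py (flat : List (String × List (String × String))) (hosts : List String) (out : List String) : Prop := out = find_identity_fields_py_alt flat hosts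
instance (flat : List (String × List (String × String))) (hosts : List String) (out : List String) : Decidable (Spec_find_identity_fields_py flat hosts out) := by unfold Spec_find_identity_fields_py; infer_instance

-- ===== CLAIM (what is proved, stated in full; the proofs are below) =====
def Claim_equal_find_identity_fields_py : Prop := ∀ (flat : List (String × List (String × String))) (hosts : List String), Dom_find_identity_fields_py flat hosts → Pre_find_identity_fields_py flat hosts → Spec_find_identity_fields_py flat hosts (find_identity_fields_py flat hosts)

-- ===== LEMMAS AND PROOFS =====

-- flat[h] (the items of host h; [] only outside Pre_)
def pvItems (flat : List (String × List (String × String))) (h : String) : List (String × String) :=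
  PySem.Dict.getD (⟨flat⟩ : PySem.Dict String (List (String × String))) h []
-- the field paths of host h
def pvKeys (flat : List (String × List (String × String))) (h : String) : List String :=
  (pvItems flat h).map Prod.fst
-- the signature of path p on host h
def pvSig (flat : List (String × List (String × String))) (h p : String) : String × String :=
  ("str", PySem.Dict.getD (⟨pvItems flat h⟩ : PySem.Dict String String) p "")
-- one step of A's inner uniqueness loop, on the signature it consumes
def pvStep (st : PySem.Set (String × String) × Bool) (x : String × String) :
    PySem.Set (String × String) × Bool :=
  if st.2 then
    if PySem.Set.contains st.1 x then (st.1, false)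
    else (PySem.Set.add st.1 x, true)
  else st
-- aggregate value of B's accumulator dict at path p after the whole item stream L
def pvVal (L : List (String × String)) (p : String) : Int × PySem.Set (String × String) :=
  (((L.map Prod.fst).count p : Int),
   PySem.Set.ofList ((L.filter (fun e => e.1 == p)).map (fun e => (("str", e.2) : String × String))))
-- B's accumulator dict, in closed form
def pvModel (L : List (String × String)) : PySem.Dict String (Int × PySem.Set (String × String)) :=
  ⟨(PySem.List.dedup (L.map Prod.fst)).map (fun p => (p, pvVal L p))⟩

theorem pv_inter_fold (rest : List (PySem.Set String)) (s : PySem.Set String) :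
    rest.foldl (fun s ps => PySem.Set.inter s ps) s
      = s.filter (fun p => rest.all (fun t => t.contains p)) := by
  induction rest generalizing s with
  | nil => simp
  | cons t rest ih =>
    rw [List.foldl_cons, ih]
    show List.filter _ (PySem.Set.inter s t) = _
    rw [PySem.Set.inter, List.filter_filter]
    simp [List.all_cons, Bool.and_comm]

theorem pv_uniq_fold_false (L : List (String × String)) (s : PySem.Set (String × String)) :
    L.foldl pvStep (s, false) = (s, false) := by
  induction L with
  | nil => rfl
  | cons y L ih => simpa [pvStep] using ih

theorem pv_uniq_fold (L : List (String × String)) (s : PySem.Set (String × String)) :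
    ((L.foldl pvStep (s, true)).2 = true) ↔ (L.Nodup ∧ ∀ x ∈ L, x ∉ s) := by
  induction L generalizing s with
  | nil => simp
  | cons x L ih =>
    rw [List.foldl_cons]
    by_cases hx : x ∈ s
    · have : pvStep (s, true) x = (s, false) := by
        simp [pvStep, hx]
      rw [this, pv_uniq_fold_false]
      simp only [Bool.false_eq_true, false_iff, List.nodup_cons, List.mem_cons]
      intro ⟨_, h2⟩
      exact h2 x (Or.inl rfl) hx
    · have : pvStep (s, true) x = (s ++ [x], true) := by
        simp [pvStep, hx]
      rw [this, ih]
      simp only [List.nodup_cons, List.mem_cons]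
      constructor
      · rintro ⟨hnd, hf⟩
        refine ⟨⟨fun hxL => (hf x hxL) (by simp), hnd⟩, ?_⟩
        rintro y (rfl | hy)
        · exact hx
        · intro hys; exact hf y hy (by simp [hys])
      · rintro ⟨⟨hxL, hnd⟩, hf⟩
        refine ⟨hnd, fun y hy hmem => ?_⟩
        rcases List.mem_append.1 hmem with h | h
        · exact hf y (Or.inr hy) h
        · simp at h; subst h; exact hxL hy

theorem pv_out_fold {α : Type} (key : α → String) (cond : α → Bool)
    (l : List α) (acc : List String)
    (hfresh : ∀ x ∈ l, key x ∉ acc) (hnd : (l.map key).Nodup) :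
    l.foldl (fun out x => if cond x then PySem.Set.add out (key x) else out) acc
      = acc ++ (l.filter cond).map key := by
  induction l generalizing acc with
  | nil => simp
  | cons x l ih =>
    simp only [List.map_cons, List.nodup_cons] at hnd
    rw [List.foldl_cons]
    by_cases hc : cond x
    · rw [if_pos hc, PySem.Set.add_of_not_mem (hfresh x (List.mem_cons_self))]
      rw [ih (acc ++ [key x]) ?_ hnd.2]
      · simp [hc]
      · intro y hy hmem
        rcases List.mem_append.1 hmem with h | h
        · exact hfresh y (List.mem_cons_of_mem _ hy) h
        · simp at h
          exact hnd.1 (h ▸ List.mem_map_of_mem hy)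
    · rw [if_neg hc, ih acc (fun y hy => hfresh y (List.mem_cons_of_mem _ hy)) hnd.2]
      simp [hc]

theorem pv_double_fold (flat : List (String × List (String × String))) (hosts : List String)
    (step : PySem.Dict String (Int × PySem.Set (String × String)) → (String × String) → PySem.Dict String (Int × PySem.Set (String × String)))
    (d : PySem.Dict String (Int × PySem.Set (String × String))) :
    hosts.foldl (fun d h => (pvItems flat h).foldl step d) d
      = (hosts.flatMap (pvItems flat)).foldl step d := by
  induction hosts generalizing d with
  | nil => rfl
  | cons h hosts ih => simp [List.flatMap_cons, List.foldl_append, ih]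

theorem pvVal_append_ne (L : List (String × String)) (e : String × String) (q : String)
    (hqe : q ≠ e.1) : pvVal (L ++ [e]) q = pvVal L q := by
  unfold pvVal
  rw [List.map_append, List.count_append, List.filter_append]
  simp [Ne.symm hqe, beq_iff_eq]

theorem pvVal_append_self (L : List (String × String)) (e : String × String) :
    pvVal (L ++ [e]) e.1 = (((L.map Prod.fst).count e.1 : Int) + 1,
      PySem.Set.add (pvVal L e.1).2 ("str", e.2)) := by
  unfold pvVal
  have h1 : List.filter (fun x => x.1 == e.1) [e] = [e] := by simp
  rw [List.map_append, List.count_append, List.filter_append, h1, List.map_append]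
  simp only [List.map_cons, List.map_nil]
  rw [PySem.Set.ofList_append_singleton]
  simp

theorem pv_model_keys (L : List (String × String)) :
    (pvModel L).keys = PySem.List.dedup (L.map Prod.fst) := by
  show List.map (fun x => x.1)
      ((PySem.List.dedup (L.map Prod.fst)).map (fun p => (p, pvVal L p))) = _
  rw [List.map_map]
  have h : ((fun (x : String × (Int × PySem.Set (String × String))) => x.1)
      ∘ fun p => (p, pvVal L p)) = id := rfl
  rw [h, List.map_id]

theorem pv_model_keys_nodup (L : List (String × String)) : (pvModel L).keys.Nodup := by
  rw [pv_model_keys]; exact PySem.Set.nodup_ofList _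

theorem pv_model_contains (L : List (String × String)) (p : String) :
    ((pvModel L).contains p = true) ↔ p ∈ L.map Prod.fst := by
  rw [PySem.Dict.contains_iff_mem_keys, pv_model_keys, PySem.List.dedup]
  exact PySem.Set.mem_ofList _ _

theorem pv_model_getD_mem (L : List (String × String)) (p : String)
    (hp : p ∈ L.map Prod.fst) :
    (pvModel L).getD p (0, PySem.Set.empty) = pvVal L p := by
  have hmem : (p, pvVal L p) ∈ (pvModel L).items :=
    List.mem_map_of_mem (by rw [PySem.List.dedup]; exact (PySem.Set.mem_ofList _ _).2 hp)
  exact PySem.Dict.getD_of_mem_items _ hmem (pv_model_keys_nodup L) _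

theorem pv_model_getD_not_mem (L : List (String × String)) (p : String)
    (hp : p ∉ L.map Prod.fst) :
    (pvModel L).getD p (0, PySem.Set.empty) = (0, PySem.Set.empty) := by
  apply PySem.Dict.getD_of_not_contains
  have h : ¬ ((pvModel L).contains p = true) := fun hc => hp ((pv_model_contains L p).1 hc)
  simpa using h

theorem pv_model_fold (L : List (String × String)) :
    L.foldl (fun d2 pv =>
        PySem.Dict.insert d2 pv.1 ((PySem.Dict.getD d2 pv.1 (0, PySem.Set.empty)).1 + 1,
          PySem.Set.add (PySem.Dict.getD d2 pv.1 (0, PySem.Set.empty)).2 ("str", pv.2)))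
      PySem.Dict.empty = pvModel L := by
  induction L using List.reverseRecOn with
  | nil => rfl
  | append_singleton L e ih =>
    rw [List.foldl_append, ih, List.foldl_cons, List.foldl_nil]
    show PySem.Dict.insert (pvModel L) e.1
        (((pvModel L).getD e.1 (0, PySem.Set.empty)).1 + 1,
         PySem.Set.add ((pvModel L).getD e.1 (0, PySem.Set.empty)).2 ("str", e.2))
      = pvModel (L ++ [e])
    by_cases hp : e.1 ∈ L.map Prod.fst
    · rw [pv_model_getD_mem L e.1 hp]
      rw [PySem.Dict.insert, if_pos ((pv_model_contains L e.1).2 hp)]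
      apply PySem.Dict.ext
      show ((PySem.List.dedup (L.map Prod.fst)).map (fun p => (p, pvVal L p))).map _
          = (PySem.List.dedup ((L ++ [e]).map Prod.fst)).map (fun p => (p, pvVal (L ++ [e]) p))
      have hded : PySem.List.dedup ((L ++ [e]).map Prod.fst) = PySem.List.dedup (L.map Prod.fst) := by
        rw [List.map_append, List.map_cons, List.map_nil, PySem.List.dedup, PySem.List.dedup,
          PySem.Set.ofList_append_singleton, PySem.Set.add_of_mem ((PySem.Set.mem_ofList _ _).2 hp)]
      rw [hded, List.map_map]
      apply List.map_congr_left
      intro q hq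
      simp only [Function.comp_apply]
      by_cases hqe : q = e.1
      · rw [hqe, if_pos (by simp)]
        rw [pvVal_append_self]
        rfl
      · rw [if_neg (by simp [hqe]), pvVal_append_ne L e q hqe]
    · rw [pv_model_getD_not_mem L e.1 hp]
      rw [PySem.Dict.insert,
        if_neg (fun hc => hp ((pv_model_contains L e.1).1 hc))]
      apply PySem.Dict.ext
      show ((PySem.List.dedup (L.map Prod.fst)).map (fun p => (p, pvVal L p))) ++ [(e.1, _)]
          = (PySem.List.dedup ((L ++ [e]).map Prod.fst)).map (fun p => (p, pvVal (L ++ [e]) p))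
      have hded : PySem.List.dedup ((L ++ [e]).map Prod.fst)
          = PySem.List.dedup (L.map Prod.fst) ++ [e.1] := by
        rw [List.map_append, List.map_cons, List.map_nil, PySem.List.dedup, PySem.List.dedup,
          PySem.Set.ofList_append_singleton,
          PySem.Set.add_of_not_mem (fun hc => hp ((PySem.Set.mem_ofList _ _).1 hc))]
      rw [hded, List.map_append]
      congr 1
      · apply List.map_congr_left
        intro q hq
        have hq' : q ∈ L.map Prod.fst := (PySem.Set.mem_ofList _ _).1 hq
        have hqe : q ≠ e.1 := fun h => hp (h ▸ hq')
        rw [pvVal_append_ne L e q hqe]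
      · rw [List.map_cons, List.map_nil, pvVal_append_self]
        have h0 : (L.map Prod.fst).count e.1 = 0 := List.count_eq_zero.2 hp
        have hf : L.filter (fun x => x.1 == e.1) = [] := by
          rw [List.filter_eq_nil_iff]
          intro a ha hbe
          exact hp (by rw [← show a.1 = e.1 by simpa using hbe]; exact List.mem_map_of_mem ha)
        show [(e.1, ((0 : Int) + 1, PySem.Set.add PySem.Set.empty ("str", e.2)))] = _
        rw [pvVal]
        simp [h0, hf]

theorem pv_ofList_length_iff {α : Type} [BEq α] [LawfulBEq α] (xs : List α) :
    (PySem.Set.ofList xs).length = xs.length ↔ xs.Nodup := by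
  induction xs using List.reverseRecOn with
  | nil => simp
  | append_singleton xs x ih =>
    rw [PySem.Set.ofList_append_singleton, PySem.Set.add_eq_ite]
    by_cases hx : x ∈ PySem.Set.ofList xs
    · rw [if_pos hx]
      have hle := PySem.Set.length_ofList_le xs
      have hxx : x ∈ xs := (PySem.Set.mem_ofList _ _).1 hx
      simp only [List.length_append, List.length_singleton]
      constructor
      · omega
      · intro hnd
        simp [List.nodup_append] at hnd
        exact absurd hxx (by intro hm; exact hnd.2 x hm rfl)
    · rw [if_neg hx]
      have hxx : x ∉ xs := fun h => hx ((PySem.Set.mem_ofList _ _).2 h)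
      simp only [List.length_append, List.length_singleton, Nat.add_left_inj, ih]
      constructor
      · intro hnd
        simp only [List.nodup_append, List.nodup_singleton, true_and]
        refine ⟨hnd, ?_⟩
        intro a ha b hb
        simp only [List.mem_singleton] at hb
        subst hb
        exact fun hax => hxx (hax ▸ ha)
      · intro hnd
        exact (List.nodup_append.1 hnd).1

theorem pv_filter_at_key (l : List (String × String)) (p : String)
    (hnd : (l.map Prod.fst).Nodup) (hp : p ∈ l.map Prod.fst) :
    l.filter (fun e => e.1 == p)
      = [(p, PySem.Dict.getD (⟨l⟩ : PySem.Dict String String) p "")] := by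
  induction l with
  | nil => simp at hp
  | cons a l ih =>
    simp only [List.map_cons, List.nodup_cons] at hnd
    rw [List.filter_cons]
    by_cases hpa : a.1 = p
    · rw [if_pos (by simpa using hpa)]
      have hrest : l.filter (fun e => e.1 == p) = [] := by
        rw [List.filter_eq_nil_iff]
        intro e he hbe
        exact hnd.1 (hpa ▸ (by simpa using hbe) ▸ List.mem_map_of_mem he)
      rw [hrest]
      have hg : PySem.Dict.getD (⟨a :: l⟩ : PySem.Dict String String) p "" = a.2 := by
        rw [PySem.Dict.getD_eq_get?_getD]
        rw [show (⟨a :: l⟩ : PySem.Dict String String) = (⟨(a.1, a.2) :: l⟩ : PySem.Dict String String) by rfl]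
        rw [PySem.Dict.get?_mk_cons, if_pos (by simpa using hpa)]
        rfl
      rw [hg, ← hpa]
    · rw [if_neg (by simpa using hpa)]
      have hp' : p ∈ l.map Prod.fst := by
        rcases List.mem_cons.1 hp with h | h
        · exact absurd h.symm hpa
        · exact h
      rw [ih hnd.2 hp']
      congr 1
      rw [PySem.Dict.getD_eq_get?_getD, PySem.Dict.getD_eq_get?_getD]
      rw [show (⟨a :: l⟩ : PySem.Dict String String) = (⟨(a.1, a.2) :: l⟩ : PySem.Dict String String) by rfl]
      rw [PySem.Dict.get?_mk_cons, if_neg (by simpa using hpa)]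

theorem pv_count_flatMap (flat : List (String × List (String × String)))
    (hosts : List String) (p : String) :
    ((hosts.flatMap (pvItems flat)).map Prod.fst).count p
      = (hosts.map (fun h => (pvKeys flat h).count p)).sum := by
  induction hosts with
  | nil => rfl
  | cons h hosts ih =>
    rw [List.flatMap_cons, List.map_append, List.count_append, List.map_cons, List.sum_cons, ih]
    rfl

theorem pv_sum_le (flat : List (String × List (String × String))) (hosts : List String)
    (p : String) (hnd : ∀ h ∈ hosts, (pvKeys flat h).Nodup) :
    (hosts.map (fun h => (pvKeys flat h).count p)).sum ≤ hosts.length := by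
  induction hosts with
  | nil => simp
  | cons h hosts ih =>
    rw [List.map_cons, List.sum_cons, List.length_cons]
    have h1 : (pvKeys flat h).count p ≤ 1 :=
      List.nodup_iff_count_le_one.1 (hnd h (List.mem_cons_self)) p
    have h2 := ih (fun h hh => hnd h (List.mem_cons_of_mem _ hh))
    omega

theorem pv_count_all (flat : List (String × List (String × String))) (hosts : List String)
    (p : String) (hnd : ∀ h ∈ hosts, (pvKeys flat h).Nodup) :
    ((hosts.map (fun h => (pvKeys flat h).count p)).sum = hosts.length)
      ↔ ∀ h ∈ hosts, p ∈ pvKeys flat h := by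
  induction hosts with
  | nil => simp
  | cons h hosts ih =>
    rw [List.map_cons, List.sum_cons, List.length_cons]
    have h1 : (pvKeys flat h).count p ≤ 1 :=
      List.nodup_iff_count_le_one.1 (hnd h (List.mem_cons_self)) p
    have h2 := pv_sum_le flat hosts p (fun h hh => hnd h (List.mem_cons_of_mem _ hh))
    have ih' := ih (fun h hh => hnd h (List.mem_cons_of_mem _ hh))
    constructor
    · intro he
      have hs : (hosts.map (fun h => (pvKeys flat h).count p)).sum = hosts.length := by omega
      intro g hg
      rcases List.mem_cons.1 hg with rfl | hg'
      · exact List.count_pos_iff.1 (by omega)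
      · exact (ih'.1 hs) g hg'
    · intro hall
      have hc1 : 0 < (pvKeys flat h).count p :=
        List.count_pos_iff.2 (hall h (List.mem_cons_self))
      have hs : (hosts.map (fun h => (pvKeys flat h).count p)).sum = hosts.length :=
        ih'.2 (fun g hg => hall g (List.mem_cons_of_mem _ hg))
      omega

-- every host's key list is duplicate-free (from Pre_; a missing host has no keys)
theorem pv_keys_nodup (flat : List (String × List (String × String)))
    (hpre : ∀ e ∈ flat, (e.2.map Prod.fst).Nodup) (h : String) : (pvKeys flat h).Nodup := by
  unfold pvKeys pvItems
  rw [PySem.Dict.getD_eq_get?_getD]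
  cases hg : PySem.Dict.get? (⟨flat⟩ : PySem.Dict String (List (String × String))) h with
  | none => simp
  | some v =>
    have hv : (h, v) ∈ flat := PySem.Dict.mem_items_of_get?_eq_some _ hg
    simpa using hpre (h, v) hv

theorem pv_out_fold_id (cond : String → Bool) (l acc : List String)
    (hfresh : ∀ x ∈ l, x ∉ acc) (hnd : l.Nodup) :
    l.foldl (fun out x => if cond x then PySem.Set.add out x else out) acc
      = acc ++ l.filter cond := by
  have h := pv_out_fold (fun x => x) cond l acc hfresh (by simpa using hnd)
  simpa using h

-- under Pre_, the stream entries at a path present in every host are exactly one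
-- signature per host, in host order
theorem pv_sig_stream (flat : List (String × List (String × String))) (p : String)
    (hndk : ∀ h, (pvKeys flat h).Nodup) :
    ∀ hosts' : List String, (∀ h ∈ hosts', p ∈ pvKeys flat h) →
    ((hosts'.flatMap (pvItems flat)).filter (fun e => e.1 == p)).map
        (fun e => (("str", e.2) : String × String))
      = hosts'.map (fun h => pvSig flat h p) := by
  intro hosts' hall
  induction hosts' with
  | nil => rfl
  | cons h hosts' ih =>
    rw [List.flatMap_cons, List.filter_append, List.map_append, List.map_cons,
      pv_filter_at_key (pvItems flat h) p (hndk h) (hall h (List.mem_cons_self)),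
      ih (fun g hg => hall g (List.mem_cons_of_mem _ hg))]
    rfl

-- ===== VERDICT (by name: the statement is the Claim_ definition above) =====
theorem find_identity_fields_py_spec : Claim_equal_find_identity_fields_py := by
  intro flat hosts _hdom hpre
  unfold Spec_find_identity_fields_py find_identity_fields_py find_identity_fields_py_alt
  by_cases hlen : hosts.length < 2
  · rw [if_pos hlen, if_pos hlen]
  · rw [if_neg hlen, if_neg hlen]
    obtain ⟨h0, hs, rfl⟩ : ∃ h0 hs, hosts = h0 :: hs := by
      cases hosts with
      | nil => simp at hlen
      | cons a l => exact ⟨a, l, rfl⟩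
    have hndk : ∀ h, (pvKeys flat h).Nodup := pv_keys_nodup flat hpre.2
    show ((hs.map (fun h => PySem.Set.ofList (pvKeys flat h))).foldl
            (fun s ps => PySem.Set.inter s ps) (PySem.Set.ofList (pvKeys flat h0))).foldl
          (fun identity path =>
            if ((h0 :: hs).foldl (fun st h => pvStep st (pvSig flat h path))
                (PySem.Set.empty, true)).2
            then PySem.Set.add identity path else identity) ([] : List String)
        = (PySem.Dict.items ((h0 :: hs).foldl (fun d h => (pvItems flat h).foldl
              (fun d2 pv => PySem.Dict.insert d2 pv.1
                ((PySem.Dict.getD d2 pv.1 (0, PySem.Set.empty)).1 + 1,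
                 PySem.Set.add (PySem.Dict.getD d2 pv.1 (0, PySem.Set.empty)).2 ("str", pv.2))) d)
              PySem.Dict.empty)).foldl
            (fun out e => if e.2.1 == (((h0 :: hs).length : Nat) : Int)
                && PySem.Set.len e.2.2 == (((h0 :: hs).length : Nat) : Int)
              then PySem.Set.add out e.1 else out) ([] : List String)
    rw [pv_inter_fold, pv_double_fold, pv_model_fold]
    set L : List (String × String) := (h0 :: hs).flatMap (pvItems flat) with hL
    set n : Int := (((h0 :: hs).length : Nat) : Int) with hn
    -- A's output is a filter of the shared key list
    have hsharednd : ((PySem.Set.ofList (pvKeys flat h0)).filter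
        (fun p => (hs.map (fun h => PySem.Set.ofList (pvKeys flat h))).all
          (fun t => t.contains p))).Nodup :=
      (PySem.Set.nodup_ofList _).filter _
    rw [pv_out_fold_id _ _ [] (by simp) hsharednd, List.nil_append, List.filter_filter]
    -- B's output is a filter of the deduplicated full key stream
    rw [pv_out_fold Prod.fst _ ((pvModel L).items) [] (by simp)
        (by have := pv_model_keys_nodup L; exact this), List.nil_append]
    show _ = (((PySem.List.dedup (L.map Prod.fst)).map (fun p => (p, pvVal L p))).filter _).map Prod.fst
    rw [List.filter_map, List.map_map]
    have hid : (Prod.fst ∘ fun (p : String) => (p, pvVal L p)) = id := rfl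
    rw [hid, List.map_id]
    -- split the deduplicated stream keys into host-0 keys and the rest
    have hKL : L.map Prod.fst = pvKeys flat h0 ++ hs.flatMap (pvKeys flat) := by
      rw [hL, List.map_flatMap, List.flatMap_cons]
      rfl
    rw [hKL, PySem.List.dedup, PySem.Set.ofList_append, PySem.Set.update_eq_append_filter,
      List.filter_append]
    -- keys absent from host 0 never pass B's count test
    have hext : ((PySem.Set.ofList (hs.flatMap (pvKeys flat))).filter
          (fun y => !(PySem.Set.contains (PySem.Set.ofList (pvKeys flat h0)) y))).filter
        ((fun e => e.2.1 == n && PySem.Set.len e.2.2 == n) ∘ fun p => (p, pvVal L p)) = [] := by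
      rw [List.filter_eq_nil_iff]
      intro y hy
      have hy0 : y ∉ pvKeys flat h0 := by
        have := (List.mem_filter.1 hy).2
        intro hmem
        simp [PySem.Set.mem_ofList, hmem] at this
      simp only [Function.comp_apply, Bool.and_eq_true, not_and]
      intro hcnt
      exfalso
      apply hy0
      have hcnt1 : (((L.map Prod.fst).count y : Nat) : Int) = n := beq_iff_eq.1 hcnt
      have hcnt' : (L.map Prod.fst).count y = (h0 :: hs).length := by
        rw [hn] at hcnt1
        exact_mod_cast hcnt1
      rw [pv_count_flatMap flat (h0 :: hs) y] at hcnt'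
      exact (pv_count_all flat (h0 :: hs) y (fun h _ => hndk h)).1 hcnt' h0 (List.mem_cons_self)
    rw [hext, List.append_nil]
    -- pointwise, A's shared-and-all-unique test equals B's count-and-size test
    apply List.filter_congr
    intro p hp
    have hp0 : p ∈ pvKeys flat h0 := (PySem.Set.mem_ofList _ _).1 hp
    simp only [Function.comp_apply]
    by_cases hM : ∀ h ∈ (h0 :: hs), p ∈ pvKeys flat h
    · -- the path is shared by all hosts
      have hmemall : (hs.map (fun h => PySem.Set.ofList (pvKeys flat h))).all
          (fun t => t.contains p) = true := by
        simp only [List.all_map, List.all_eq_true, Function.comp_apply, PySem.Set.contains_iff]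
        intro h hh
        exact (PySem.Set.mem_ofList _ _).2 (hM h (List.mem_cons_of_mem _ hh))
      have hcnt : ((pvVal L p).1 == n) = true := by
        have : (L.map Prod.fst).count p = (h0 :: hs).length := by
          rw [pv_count_flatMap flat (h0 :: hs) p]
          exact (pv_count_all flat (h0 :: hs) p (fun h _ => hndk h)).2 hM
        show ((((L.map Prod.fst).count p : Nat) : Int) == n) = true
        rw [this, hn]
        simp
      have hsigs : (pvVal L p).2
          = PySem.Set.ofList ((h0 :: hs).map (fun h => pvSig flat h p)) := by
        show PySem.Set.ofList _ = _
        rw [pv_sig_stream flat p hndk (h0 :: hs) hM]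
      rw [hmemall, Bool.and_true, hcnt, Bool.true_and]
      rw [Bool.eq_iff_iff]
      have huniq := pv_uniq_fold ((h0 :: hs).map (fun h => pvSig flat h p)) PySem.Set.empty
      have hfm := List.foldl_map (f := fun h => pvSig flat h p) (g := pvStep)
        (l := h0 :: hs) (init := ((PySem.Set.empty : PySem.Set (String × String)), true))
      rw [← hfm, huniq]
      have hlenmap : ((h0 :: hs).map (fun h => pvSig flat h p)).length = (h0 :: hs).length :=
        List.length_map ..
      constructor
      · intro ⟨hnd', _⟩
        show (PySem.Set.len (pvVal L p).2 == n) = true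
        rw [hsigs, hn]
        show ((((PySem.Set.ofList ((h0 :: hs).map (fun h => pvSig flat h p))).length : Nat) : Int)
          == ((h0 :: hs).length : Int)) = true
        rw [← hlenmap, (pv_ofList_length_iff _).2 hnd']
        simp
      · intro hlen'
        refine ⟨?_, by simp [PySem.Set.empty]⟩
        apply (pv_ofList_length_iff ((h0 :: hs).map (fun h => pvSig flat h p))).1
        have : (PySem.Set.len (pvVal L p).2 == n) = true := hlen'
        rw [hsigs, hn] at this
        have h1 : (((PySem.Set.ofList ((h0 :: hs).map (fun h => pvSig flat h p))).length : Nat) : Int)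
            = (((h0 :: hs).length : Nat) : Int) := beq_iff_eq.1 this
        have h2 : ((PySem.Set.ofList ((h0 :: hs).map (fun h => pvSig flat h p))).length : Nat)
            = (h0 :: hs).length := by exact_mod_cast h1
        rw [h2, hlenmap]
    · -- the path misses some host: both tests fail
      have hnots : ¬ ∀ h ∈ hs, p ∈ pvKeys flat h := by
        intro hall
        apply hM
        intro h hh
        rcases List.mem_cons.1 hh with rfl | hh'
        · exact hp0
        · exact hall h hh'
      have hmemall : (hs.map (fun h => PySem.Set.ofList (pvKeys flat h))).all
          (fun t => t.contains p) = false := by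
        rw [← Bool.not_eq_true]
        simp only [List.all_map, List.all_eq_true, Function.comp_apply, PySem.Set.contains_iff]
        intro hall
        exact hnots (fun h hh => (PySem.Set.mem_ofList _ _).1 (hall h hh))
      have hcnt : ((pvVal L p).1 == n) = false := by
        rw [← Bool.not_eq_true]
        intro hbe
        apply hM
        have hbe1 : (((L.map Prod.fst).count p : Nat) : Int) = n := beq_iff_eq.1 hbe
        have hbe2 : (L.map Prod.fst).count p = (h0 :: hs).length := by
          rw [hn] at hbe1
          exact_mod_cast hbe1
        rw [pv_count_flatMap flat (h0 :: hs) p] at hbe2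
        exact (pv_count_all flat (h0 :: hs) p (fun h _ => hndk h)).1 hbe2
      rw [hmemall, hcnt]
      simp
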